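-- pv_equiv track=rewrite | github.com/mr-pyle/Tron-2026 | new.py | evaluate_move_with_prediction
-- ===== SOURCE A (Python) =====
-- from collections import deque
--
-- def evaluate_move_with_prediction(my_future_pos, enemies, board, grid_dim):
--     """
--     Simulates what happens if we move to my_future_pos.
--     It looks at the closest enemy, guesses all their possible next moves,
--     and assumes they will pick the one that gives US the least territory.
--     """
--     if not enemies:
--         return calculate_territory(my_future_pos, enemies, board, grid_dim)
--
--     # Find the most immediate threat (closest enemy)
--     closest_enemy = min(enemies, key=lambda e: abs(e[0] - my_future_pos[0]) + abs(e[1] - my_future_pos[1]))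
--
--     # Figure out all valid moves the enemy could make next turn
--     ex, ey = closest_enemy
--     enemy_options = [(ex, ey - 1), (ex, ey + 1), (ex - 1, ey), (ex + 1, ey)]
--     valid_enemy_moves = [ep for ep in enemy_options
--                          if 0 <= ep[0] < grid_dim and 0 <= ep[1] < grid_dim
--                          and ep not in board and ep != my_future_pos]
--
--     if not valid_enemy_moves:
--         # The enemy is trapped next turn; moving here is a massive win
--         return calculate_territory(my_future_pos, enemies, board, grid_dim) + 1000
--
--     # MINIMAX: Assume the enemy picks the move that minimizes our territory
--     worst_case_territory = float('inf')
--
--     for enemy_future_pos in valid_enemy_moves: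
--         # Simulate the board state with the enemy in their new position
--         simulated_enemies = [enemy_future_pos if e == closest_enemy else e for e in enemies]
--
--         # Calculate how much territory we would get in this simulated scenario
--         territory = calculate_territory(my_future_pos, simulated_enemies, board, grid_dim)
--
--         if territory < worst_case_territory:
--             worst_case_territory = territory
--
--     return worst_case_territory
--
-- def calculate_territory(my_future_pos, enemies, board, grid_dim):
--     queue = deque()
--     visited = {}
--     queue.append((my_future_pos, 0, 'ME'))
--     visited[my_future_pos] = 'ME'
--
--     for e in enemies:
--         queue.append((e, 0, 'ENEMY'))
--         visited[e] = 'ENEMY'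
--
--     my_territory = 0
--     while queue:
--         (cx, cy), dist, owner = queue.popleft()
--         if owner == 'ME':
--             my_territory += 1
--         for dx, dy in [(0, 1), (0, -1), (1, 0), (-1, 0)]:
--             nx, ny = cx + dx, cy + dy
--             if 0 <= nx < grid_dim and 0 <= ny < grid_dim and (nx, ny) not in board and (nx, ny) not in visited:
--                 visited[(nx, ny)] = owner
--                 queue.append(((nx, ny), dist + 1, owner))
--     return my_territory
-- ===== SOURCE B (Python) =====
-- def evaluate_move_with_prediction(my_future_pos, enemies, board, grid_dim):
--     """Same prediction/minimax wrapper; the territory count is computed by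
--     set-algebra rounds (whole frontiers expanded as set comprehensions, my
--     frontier before the enemies' each round) instead of a tagged FIFO BFS."""
--     if not enemies:
--         return calculate_territory(my_future_pos, enemies, board, grid_dim)
--
--     closest = min(enemies, key=lambda e: abs(e[0] - my_future_pos[0]) + abs(e[1] - my_future_pos[1]))
--
--     moves = [m for m in _adjacent(closest)
--              if 0 <= m[0] < grid_dim and 0 <= m[1] < grid_dim
--              and m not in board and m != my_future_pos]
--
--     if not moves:
--         return calculate_territory(my_future_pos, enemies, board, grid_dim) + 1000
--
--     return min(calculate_territory(my_future_pos,
--                                    [m if e == closest else e for e in enemies],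
--                                    board, grid_dim)
--                for m in moves)
--
-- def calculate_territory(my_future_pos, enemies, board, grid_dim):
--     # Round-by-round set algebra: no queue, no distances, no owner tags.
--     blocked = set(board)
--     mine = {my_future_pos}
--     theirs = set(enemies) - mine
--     claimed = mine | theirs
--     territory = 0
--     while mine or theirs:
--         territory += len(mine)
--         mine = _spread(mine, blocked, claimed, grid_dim)
--         claimed |= mine
--         theirs = _spread(theirs, blocked, claimed, grid_dim)
--         claimed |= theirs
--     return territory
--
-- def _spread(region, blocked, claimed, grid_dim):
--     # all fresh in-grid cells one step out from the whole region
--     return {n for c in region for n in _adjacent(c)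
--             if 0 <= n[0] < grid_dim and 0 <= n[1] < grid_dim
--             and n not in blocked and n not in claimed}
--
-- def _adjacent(c):
--     x, y = c
--     return ((x, y + 1), (x, y - 1), (x + 1, y), (x - 1, y))
-- ===== Notes on version B (the rewrite author's own statement) =====
-- stated objective: alternative
-- what changed: calculate_territory's tagged multi-source FIFO BFS (a deque of (pos,dist,owner) tuples and an owner dict) is replaced by round-by-round set algebra: a blocked set, a claimed set and two untagged frontier sets expanded whole by set comprehensions (mine before the enemies' each round), counting len(mine) per round; the minimax wrapper is decomposed through a shared _adjacent helper and min() over a generator.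
import Mathlib
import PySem

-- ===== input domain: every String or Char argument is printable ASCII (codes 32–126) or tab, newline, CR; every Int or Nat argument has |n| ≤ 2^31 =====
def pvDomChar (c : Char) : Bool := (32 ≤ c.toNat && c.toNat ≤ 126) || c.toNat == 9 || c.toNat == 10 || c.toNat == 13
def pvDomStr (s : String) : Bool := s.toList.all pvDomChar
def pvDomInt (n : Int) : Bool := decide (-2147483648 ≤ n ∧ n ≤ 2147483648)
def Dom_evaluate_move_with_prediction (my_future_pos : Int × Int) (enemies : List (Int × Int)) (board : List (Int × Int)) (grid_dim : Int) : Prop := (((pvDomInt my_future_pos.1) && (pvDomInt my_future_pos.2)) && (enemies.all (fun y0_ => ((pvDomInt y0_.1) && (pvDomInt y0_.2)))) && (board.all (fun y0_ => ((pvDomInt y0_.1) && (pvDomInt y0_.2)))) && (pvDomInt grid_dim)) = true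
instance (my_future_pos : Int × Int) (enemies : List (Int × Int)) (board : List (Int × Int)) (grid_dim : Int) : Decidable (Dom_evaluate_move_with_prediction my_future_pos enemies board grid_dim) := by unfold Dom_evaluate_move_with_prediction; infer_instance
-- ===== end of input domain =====

-- ===== PORT A =====
-- B replaces A's tagged multi-source FIFO flood fill (a deque of (pos,dist,owner) entries and
-- an owner dict) by round-by-round set algebra: whole frontiers are expanded as set
-- comprehensions, my frontier before the enemies' each round; the minimax wrapper is
-- decomposed through a shared neighbour helper.  Objective: alternative decomposition.
-- (Python's dict is ported as Std.HashMap; it is used for membership only, never iterated.)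

-- the in-grid cells, used only in the termination measures of the two loops
def pvCells (g : Int) : Finset (Int × Int) :=
  ((Finset.range g.toNat) ×ˢ (Finset.range g.toNat)).image (fun p => ((p.1 : Int), (p.2 : Int)))

lemma pvMem_cells {g : Int} {p : Int × Int} :
    p ∈ pvCells g ↔ 0 ≤ p.1 ∧ p.1 < g ∧ 0 ≤ p.2 ∧ p.2 < g := by
  simp only [pvCells, Finset.mem_image, Finset.mem_product, Finset.mem_range]
  constructor
  · rintro ⟨⟨a, b⟩, ⟨ha, hb⟩, rfl⟩
    simp only []
    omega
  · rintro ⟨h1, h2, h3, h4⟩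
    refine ⟨(p.1.toNat, p.2.toNat), ⟨by omega, by omega⟩, ?_⟩
    simp only [Prod.ext_iff]
    omega

-- number of in-grid cells on which the membership test `mem` is still false
def pvFree (g : Int) (mem : Int × Int → Bool) : Nat :=
  ((pvCells g).filter (fun p => mem p = false)).card

lemma pvFree_insert {g : Int} {mem mem' : Int × Int → Bool} {k : Int × Int}
    (hk : k ∈ pvCells g) (hnk : mem k = false)
    (hmem' : ∀ p, mem' p = (k == p || mem p)) :
    pvFree g mem' + 1 = pvFree g mem := by
  have hset : (pvCells g).filter (fun p => mem' p = false)
      = ((pvCells g).filter (fun p => mem p = false)).erase k := by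
    ext p
    simp only [Finset.mem_filter, Finset.mem_erase, hmem', Bool.or_eq_false_iff,
      beq_eq_false_iff_ne, ne_eq]
    tauto
  have hmem : k ∈ (pvCells g).filter (fun p => mem p = false) := Finset.mem_filter.2 ⟨hk, hnk⟩
  unfold pvFree
  rw [hset]
  exact Finset.card_erase_add_one hmem

-- one neighbour test of A's inner `for dx, dy in ...` loop (state = (visited, fresh queue entries))
def pvStepA (board : List (Int × Int)) (g : Int) (owner : String) (dist : Int)
    (st : Std.HashMap (Int × Int) String × List ((Int × Int) × Int × String)) (n : Int × Int) :
    Std.HashMap (Int × Int) String × List ((Int × Int) × Int × String) :=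
  if 0 ≤ n.1 ∧ n.1 < g ∧ 0 ≤ n.2 ∧ n.2 < g ∧ n ∉ board ∧ st.1.contains n = false then
    (st.1.insert n owner, st.2 ++ [(n, dist + 1, owner)])
  else st

def pvDirs : List (Int × Int) := [(0, 1), (0, -1), (1, 0), (-1, 0)]

-- card bound for a scan: every accepted neighbour is a fresh in-grid key
lemma pvFoldA_bound {alpha : Type} (board : List (Int × Int)) (g : Int) (owner : String) (dist : Int)
    (f : alpha → Int × Int) :
    ∀ (ds : List alpha) (v : Std.HashMap (Int × Int) String)
      (acc : List ((Int × Int) × Int × String)),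
    pvFree g (fun p => (ds.foldl (fun st dd => pvStepA board g owner dist st (f dd)) (v, acc)).1.contains p)
      + (ds.foldl (fun st dd => pvStepA board g owner dist st (f dd)) (v, acc)).2.length
    ≤ pvFree g (fun p => v.contains p) + acc.length := by
  intro ds
  induction ds with
  | nil => intro v acc; simp
  | cons d ds ih =>
    intro v acc
    simp only [List.foldl_cons]
    unfold pvStepA
    split
    · rename_i hcond
      refine le_trans (ih _ _) ?_
      have hk : f d ∈ pvCells g := pvMem_cells.2 ⟨hcond.1, hcond.2.1, hcond.2.2.1, hcond.2.2.2.1⟩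
      have := pvFree_insert (g := g) (mem := fun p => v.contains p)
        (mem' := fun p => (v.insert (f d) owner).contains p) hk hcond.2.2.2.2.2
        (fun p => Std.HashMap.contains_insert)
      simp only [List.length_append, List.length_cons, List.length_nil]
      omega
    · exact le_trans (ih _ _) (by omega)

-- A's `while queue:` loop (deque = list, popleft = head)
def pvBfsA (board : List (Int × Int)) (g : Int)
    (queue : List ((Int × Int) × Int × String))
    (visited : Std.HashMap (Int × Int) String) (terr : Int) : Int :=
  match queue with
  | [] => terr
  | q :: rest =>
      let terr' := if q.2.2 = "ME" then terr + 1 else terr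
      let s := pvDirs.foldl
        (fun st dd => pvStepA board g q.2.2 q.2.1 st (q.1.1 + dd.1, q.1.2 + dd.2)) (visited, [])
      pvBfsA board g (rest ++ s.2) s.1 terr'
termination_by 2 * pvFree g (fun p => visited.contains p) + queue.length
decreasing_by
  have h := pvFoldA_bound board g q.2.2 q.2.1
    (fun dd : Int × Int => (q.1.1 + dd.1, q.1.2 + dd.2)) pvDirs visited []
  simp only [List.length_nil, List.length_append, List.length_cons] at *
  omega

-- A's calculate_territory
def pvCalcA (my_future_pos : Int × Int) (enemies : List (Int × Int))
    (board : List (Int × Int)) (grid_dim : Int) : Int :=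
  let queue := [(my_future_pos, (0 : Int), "ME")]
      ++ enemies.map (fun e => (e, (0 : Int), "ENEMY"))
  let visited := enemies.foldl (fun v e => v.insert e "ENEMY")
      ((∅ : Std.HashMap (Int × Int) String).insert my_future_pos "ME")
  pvBfsA board grid_dim queue visited 0

-- A's wrapper (float('inf') sentinel ported as `none`; the final `.getD 0` is unreachable:
-- the fold is over a list guarded nonempty, so the fold's result is always `some`)
def evaluate_move_with_prediction (my_future_pos : Int × Int) (enemies : List (Int × Int))
    (board : List (Int × Int)) (grid_dim : Int) : Int :=
  if enemies = [] then pvCalcA my_future_pos enemies board grid_dim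
  else
    let closest := PySem.List.minD enemies
      (fun e => |e.1 - my_future_pos.1| + |e.2 - my_future_pos.2|) (0, 0)
    let opts := [(closest.1, closest.2 - 1), (closest.1, closest.2 + 1),
                 (closest.1 - 1, closest.2), (closest.1 + 1, closest.2)]
    let valid := opts.filter (fun ep =>
      decide (0 ≤ ep.1 ∧ ep.1 < grid_dim ∧ 0 ≤ ep.2 ∧ ep.2 < grid_dim
        ∧ ep ∉ board ∧ ep ≠ my_future_pos))
    if valid = [] then pvCalcA my_future_pos enemies board grid_dim + 1000
    else
      (valid.foldl (fun (w : Option Int) m =>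
        let t := pvCalcA my_future_pos
          (enemies.map (fun e => if e = closest then m else e)) board grid_dim
        match w with
        | none => some t                              -- t < float('inf')
        | some wv => if t < wv then some t else some wv) none).getD 0

-- ===== PORT B =====
-- B's _adjacent
def pvAdjB (c : Int × Int) : List (Int × Int) :=
  [(c.1, c.2 + 1), (c.1, c.2 - 1), (c.1 + 1, c.2), (c.1 - 1, c.2)]

-- B's _spread: the set comprehension {n for c in region for n in _adjacent(c) if ...}
def pvSpreadB (region blocked claimed : PySem.Set (Int × Int)) (g : Int) :
    PySem.Set (Int × Int) :=
  PySem.Set.ofList ((region.flatMap pvAdjB).filter (fun n =>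
    decide (0 ≤ n.1 ∧ n.1 < g ∧ 0 ≤ n.2 ∧ n.2 < g ∧ n ∉ blocked ∧ n ∉ claimed)))

-- termination facts for B's round loop (cited by name in its decreasing_by)
lemma pvSpreadB_fresh {region blocked claimed : PySem.Set (Int × Int)} {g : Int} {n : Int × Int}
    (h : n ∈ pvSpreadB region blocked claimed g) : n ∈ pvCells g ∧ n ∉ claimed := by
  rw [pvSpreadB, PySem.Set.mem_ofList, List.mem_filter] at h
  obtain ⟨-, hq⟩ := h
  rw [decide_eq_true_iff] at hq
  exact ⟨pvMem_cells.2 ⟨hq.1, hq.2.1, hq.2.2.1, hq.2.2.2.1⟩, hq.2.2.2.2.2⟩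

def pvFreeL (g : Int) (s : List (Int × Int)) : Nat :=
  pvFree g (fun p => decide (p ∈ s))

lemma pvFreeL_union {g : Int} (s t : List (Int × Int)) (ht : t.Nodup)
    (hfresh : ∀ x ∈ t, x ∈ pvCells g ∧ x ∉ s) :
    pvFreeL g (PySem.Set.union s t) + t.length = pvFreeL g s := by
  have hset : (pvCells g).filter (fun p => decide (p ∈ PySem.Set.union s t) = false)
      = ((pvCells g).filter (fun p => decide (p ∈ s) = false)) \ t.toFinset := by
    ext p
    simp only [Finset.mem_filter, Finset.mem_sdiff, List.mem_toFinset,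
      decide_eq_false_iff_not, PySem.Set.mem_union]
    tauto
  have hsub : t.toFinset ⊆ (pvCells g).filter (fun p => decide (p ∈ s) = false) := by
    intro p hp
    rw [List.mem_toFinset] at hp
    obtain ⟨h1, h2⟩ := hfresh p hp
    simp only [Finset.mem_filter, decide_eq_false_iff_not]
    exact ⟨h1, h2⟩
  have hcard : t.toFinset.card = t.length := List.toFinset_card_of_nodup ht
  have hle := Finset.card_le_card hsub
  have hsd : (((pvCells g).filter (fun p => decide (p ∈ s) = false)) \ t.toFinset).card
      = ((pvCells g).filter (fun p => decide (p ∈ s) = false)).card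
        - (t.toFinset ∩ ((pvCells g).filter (fun p => decide (p ∈ s) = false))).card :=
    Finset.card_sdiff
  rw [Finset.inter_eq_left.mpr hsub, hcard] at hsd
  unfold pvFreeL pvFree
  simp only [hset, hsd]
  omega

-- B's `while mine or theirs:` loop
def pvRoundsB (blocked : PySem.Set (Int × Int)) (g : Int)
    (mine theirs claimed : PySem.Set (Int × Int)) (terr : Int) : Int :=
  if mine = [] ∧ theirs = [] then terr
  else
    let terr' := terr + (mine.length : Int)
    let nm := pvSpreadB mine blocked claimed g
    let cl1 := PySem.Set.union claimed nm
    let nt := pvSpreadB theirs blocked cl1 g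
    pvRoundsB blocked g nm nt (PySem.Set.union cl1 nt) terr'
termination_by 2 * pvFreeL g claimed + (if mine = [] ∧ theirs = [] then 0 else 1)
decreasing_by
  rename_i h
  have h1 := pvFreeL_union (g := g) claimed (pvSpreadB mine blocked claimed g)
    (PySem.Set.nodup_ofList _) (fun x hx => pvSpreadB_fresh hx)
  have h2 := pvFreeL_union (g := g) (PySem.Set.union claimed (pvSpreadB mine blocked claimed g))
    (pvSpreadB theirs blocked (PySem.Set.union claimed (pvSpreadB mine blocked claimed g)) g)
    (PySem.Set.nodup_ofList _) (fun x hx => pvSpreadB_fresh hx)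
  rw [if_neg h]
  split_ifs with hf
  · -- both new frontiers empty: the flag drops
    have e1 : (pvSpreadB mine blocked claimed g).length = 0 := by rw [hf.1]; rfl
    have e2 : (pvSpreadB theirs blocked
        (PySem.Set.union claimed (pvSpreadB mine blocked claimed g)) g).length = 0 := by
      rw [hf.2]; rfl
    omega
  · have hlen : 1 ≤ (pvSpreadB mine blocked claimed g).length
        + (pvSpreadB theirs blocked
            (PySem.Set.union claimed (pvSpreadB mine blocked claimed g)) g).length := by
      rcases not_and_or.1 hf with hne | hne
      · have := List.length_pos_of_ne_nil hne; omega
      · have := List.length_pos_of_ne_nil hne; omega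
    omega

-- B's calculate_territory
def pvCalcB (my_future_pos : Int × Int) (enemies : List (Int × Int))
    (board : List (Int × Int)) (grid_dim : Int) : Int :=
  let blocked := PySem.Set.ofList board
  let mine := PySem.Set.ofList [my_future_pos]
  let theirs := PySem.Set.diff (PySem.Set.ofList enemies) mine
  let claimed := PySem.Set.union mine theirs
  pvRoundsB blocked grid_dim mine theirs claimed 0

-- B's wrapper
def evaluate_move_with_prediction_alt (my_future_pos : Int × Int) (enemies : List (Int × Int))
    (board : List (Int × Int)) (grid_dim : Int) : Int :=
  if enemies = [] then pvCalcB my_future_pos enemies board grid_dim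
  else
    let closest := PySem.List.minD enemies
      (fun e => |e.1 - my_future_pos.1| + |e.2 - my_future_pos.2|) (0, 0)
    let moves := (pvAdjB closest).filter (fun m =>
      decide (0 ≤ m.1 ∧ m.1 < grid_dim ∧ 0 ≤ m.2 ∧ m.2 < grid_dim
        ∧ m ∉ board ∧ m ≠ my_future_pos))
    if moves = [] then pvCalcB my_future_pos enemies board grid_dim + 1000
    else
      (PySem.List.min? (moves.map (fun m =>
        pvCalcB my_future_pos
          (enemies.map (fun e => if e = closest then m else e)) board grid_dim))
        (fun t => t)).getD 0

-- ===== PRECONDITION & SPEC =====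
def Spec_evaluate_move_with_prediction (my_future_pos : Int × Int) (enemies : List (Int × Int)) (board : List (Int × Int)) (grid_dim : Int) (out : Int) : Prop := out = evaluate_move_with_prediction_alt my_future_pos enemies board grid_dim
instance (my_future_pos : Int × Int) (enemies : List (Int × Int)) (board : List (Int × Int)) (grid_dim : Int) (out : Int) : Decidable (Spec_evaluate_move_with_prediction my_future_pos enemies board grid_dim out) := by unfold Spec_evaluate_move_with_prediction; infer_instance

-- ===== CLAIM (what is proved, stated in full; the proofs are below) =====
def Claim_equal_evaluate_move_with_prediction : Prop := ∀ (my_future_pos : Int × Int) (enemies : List (Int × Int)) (board : List (Int × Int)) (grid_dim : Int), Dom_evaluate_move_with_prediction my_future_pos enemies board grid_dim → Spec_evaluate_move_with_prediction my_future_pos enemies board grid_dim (evaluate_move_with_prediction my_future_pos enemies board grid_dim)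

-- ===== LEMMAS AND PROOFS =====

-- the pure per-candidate acceptance step both programs implement
def pvAddQ (board claimed : List (Int × Int)) (g : Int)
    (k : List (Int × Int)) (n : Int × Int) : List (Int × Int) :=
  if 0 ≤ n.1 ∧ n.1 < g ∧ 0 ≤ n.2 ∧ n.2 < g ∧ n ∉ board ∧ n ∉ claimed then
    PySem.Set.add k n
  else k

-- B's _spread is the pvAddQ-fold over the candidate stream
lemma pvSpread_eq_fold (board claimed : List (Int × Int)) (g : Int)
    (region : List (Int × Int)) :
    pvSpreadB region (PySem.Set.ofList board) claimed g
      = (region.flatMap pvAdjB).foldl (pvAddQ board claimed g) [] := by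
  rw [pvSpreadB, PySem.Set.ofList_eq_foldl, List.foldl_filter]
  have hfun : (fun (k : List (Int × Int)) (n : Int × Int) =>
      if (decide (0 ≤ n.1 ∧ n.1 < g ∧ 0 ≤ n.2 ∧ n.2 < g
          ∧ n ∉ PySem.Set.ofList board ∧ n ∉ claimed)) = true
      then PySem.Set.add k n else k) = pvAddQ board claimed g := by
    funext k n
    rw [pvAddQ]
    simp only [decide_eq_true_eq, PySem.Set.mem_ofList]
  rw [hfun]

-- facts about the pvAddQ fold
lemma pvAddQ_mono (board claimed : List (Int × Int)) (g : Int) :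
    ∀ (ns : List (Int × Int)) (k : List (Int × Int)) (x : Int × Int),
      x ∈ k → x ∈ ns.foldl (pvAddQ board claimed g) k := by
  intro ns
  induction ns with
  | nil => intro k x hx; exact hx
  | cons n ns ih =>
    intro k x hx
    simp only [List.foldl_cons]
    refine ih _ _ ?_
    unfold pvAddQ
    split
    · exact (PySem.Set.mem_add _ _ _).2 (Or.inl hx)
    · exact hx

lemma pvAddQ_mem (board claimed : List (Int × Int)) (g : Int) :
    ∀ (ns : List (Int × Int)) (k : List (Int × Int)) (n : Int × Int),
      n ∈ ns → (0 ≤ n.1 ∧ n.1 < g ∧ 0 ≤ n.2 ∧ n.2 < g ∧ n ∉ board ∧ n ∉ claimed) →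
      n ∈ ns.foldl (pvAddQ board claimed g) k := by
  intro ns
  induction ns with
  | nil => intro k n hn; exact absurd hn (List.not_mem_nil)
  | cons m ns ih =>
    intro k n hn hq
    simp only [List.foldl_cons]
    rcases List.mem_cons.1 hn with rfl | hn'
    · refine pvAddQ_mono board claimed g ns _ n ?_
      unfold pvAddQ
      rw [if_pos hq]
      exact (PySem.Set.mem_add _ _ _).2 (Or.inr rfl)
    · exact ih _ n hn' hq

lemma pvAddQ_subsumed (board claimed : List (Int × Int)) (g : Int) :
    ∀ (ns : List (Int × Int)) (k : List (Int × Int)),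
      (∀ n ∈ ns, (0 ≤ n.1 ∧ n.1 < g ∧ 0 ≤ n.2 ∧ n.2 < g ∧ n ∉ board ∧ n ∉ claimed) → n ∈ k) →
      ns.foldl (pvAddQ board claimed g) k = k := by
  intro ns
  induction ns with
  | nil => intro k _; rfl
  | cons n ns ih =>
    intro k h
    simp only [List.foldl_cons]
    have hstep : pvAddQ board claimed g k n = k := by
      unfold pvAddQ
      split
      · rename_i hq
        exact PySem.Set.add_of_mem (h n (List.mem_cons_self) hq)
      · rfl
    rw [hstep]
    exact ih k (fun m hm => h m (List.mem_cons_of_mem _ hm))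

-- duplicates (and cells whose valid neighbours are all already absorbed) are inert
def pvDedupFrom (seen : List (Int × Int)) : List (Int × Int) → List (Int × Int)
  | [] => []
  | c :: l => if c ∈ seen then pvDedupFrom seen l else c :: pvDedupFrom (seen ++ [c]) l

lemma pvDedupFrom_eq (l : List (Int × Int)) :
    ∀ (seen : List (Int × Int)),
      pvDedupFrom seen l = (PySem.List.dedup l).filter (fun x => decide (x ∉ seen)) := by
  induction l with
  | nil => intro seen; simp [pvDedupFrom]
  | cons c l ih =>
    intro seen
    have hd : PySem.List.dedup (c :: l)
        = c :: (PySem.Set.ofList l).filter (fun a => !(a == c)) := by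
      simp [PySem.Set.ofList_cons]
      rfl
    rw [pvDedupFrom, hd]
    by_cases hc : c ∈ seen
    · rw [if_pos hc, ih seen, List.filter_cons_of_neg (by simp [hc]), List.filter_filter]
      simp only [PySem.List.dedup_eq_ofList]
      apply List.filter_congr
      intro a _
      by_cases hac : a = c
      · subst hac
        simp [hc]
      · simp [hac]
    · rw [if_neg hc, List.filter_cons_of_pos (by simp [hc]), ih (seen ++ [c]),
        List.filter_filter]
      simp only [PySem.List.dedup_eq_ofList]
      congr 1
      apply List.filter_congr
      intro a _
      by_cases hac : a = c
      · subst hac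
        simp
      · simp [hac]

lemma pvFoldDedup (board claimed : List (Int × Int)) (g : Int) :
    ∀ (l : List (Int × Int)) (seen k : List (Int × Int)),
      (∀ c ∈ seen, ∀ n ∈ pvAdjB c,
        (0 ≤ n.1 ∧ n.1 < g ∧ 0 ≤ n.2 ∧ n.2 < g ∧ n ∉ board ∧ n ∉ claimed) → n ∈ k) →
      (l.flatMap pvAdjB).foldl (pvAddQ board claimed g) k
        = ((pvDedupFrom seen l).flatMap pvAdjB).foldl (pvAddQ board claimed g) k := by
  intro l
  induction l with
  | nil => intro seen k _; rfl
  | cons c l ih =>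
    intro seen k hseen
    rw [List.flatMap_cons, List.foldl_append]
    by_cases hc : c ∈ seen
    · rw [pvAddQ_subsumed board claimed g _ k (fun n hn hq => hseen c hc n hn hq)]
      rw [show pvDedupFrom seen (c :: l) = pvDedupFrom seen l from by
        rw [pvDedupFrom]; exact if_pos hc]
      exact ih seen k hseen
    · rw [show pvDedupFrom seen (c :: l) = c :: pvDedupFrom (seen ++ [c]) l from by
        rw [pvDedupFrom]; exact if_neg hc]
      rw [List.flatMap_cons, List.foldl_append]
      refine ih (seen ++ [c]) _ ?_
      intro c' hc' n hn hq
      rcases List.mem_append.1 hc' with hold | hnew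
      · exact pvAddQ_mono board claimed g _ _ n (hseen c' hold n hn hq)
      · rw [List.mem_singleton] at hnew
        subst hnew
        exact pvAddQ_mem board claimed g _ _ n hn hq

-- A's inner neighbour scan runs the same pvAddQ fold (visited ≡ claimed ∪ kept)
lemma pvScanA (board claimed : List (Int × Int)) (g : Int) (w : String) (d : Int) :
    ∀ (ns : List (Int × Int)) (v : Std.HashMap (Int × Int) String) (k : List (Int × Int)),
      (∀ x, v.contains x = true ↔ x ∈ claimed ∨ x ∈ k) →
      (∀ x, (ns.foldl (pvStepA board g w d) (v, k.map (fun c => (c, d + 1, w)))).1.contains x = true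
          ↔ x ∈ claimed ∨ x ∈ ns.foldl (pvAddQ board claimed g) k)
      ∧ (ns.foldl (pvStepA board g w d) (v, k.map (fun c => (c, d + 1, w)))).2
          = (ns.foldl (pvAddQ board claimed g) k).map (fun c => (c, d + 1, w)) := by
  intro ns
  induction ns with
  | nil => intro v k hv; exact ⟨hv, rfl⟩
  | cons n ns ih =>
    intro v k hv
    simp only [List.foldl_cons]
    by_cases hP : 0 ≤ n.1 ∧ n.1 < g ∧ 0 ≤ n.2 ∧ n.2 < g ∧ n ∉ board
    · by_cases hc : n ∈ claimed ∨ n ∈ k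
      · have hvn : v.contains n = true := (hv n).2 hc
        have hstep : pvStepA board g w d (v, k.map (fun c => (c, d + 1, w))) n
            = (v, k.map (fun c => (c, d + 1, w))) := by
          unfold pvStepA
          rw [if_neg]
          rintro ⟨-, -, -, -, -, h6⟩
          rw [hvn] at h6
          exact absurd h6 (by simp)
        have hq : pvAddQ board claimed g k n = k := by
          unfold pvAddQ
          rcases hc with hcl | hk
          · rw [if_neg]
            rintro ⟨-, -, -, -, -, h6⟩
            exact h6 hcl
          · split
            · exact PySem.Set.add_of_mem hk
            · rfl
        rw [hstep, hq]
        exact ih v k hv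
      · push Not at hc
        have hvn : v.contains n = false := by
          cases hcontains : v.contains n
          · rfl
          · exact absurd ((hv n).1 hcontains) (by tauto)
        have hstep : pvStepA board g w d (v, k.map (fun c => (c, d + 1, w))) n
            = (v.insert n w, (k ++ [n]).map (fun c => (c, d + 1, w))) := by
          unfold pvStepA
          rw [if_pos ⟨hP.1, hP.2.1, hP.2.2.1, hP.2.2.2.1, hP.2.2.2.2, hvn⟩]
          simp
        have hq : pvAddQ board claimed g k n = k ++ [n] := by
          unfold pvAddQ
          rw [if_pos ⟨hP.1, hP.2.1, hP.2.2.1, hP.2.2.2.1, hP.2.2.2.2, hc.1⟩]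
          exact PySem.Set.add_of_not_mem hc.2
        rw [hstep, hq]
        refine ih _ _ (fun x => ?_)
        rw [Std.HashMap.contains_insert]
        simp only [Bool.or_eq_true, beq_iff_eq, List.mem_append, List.mem_singleton]
        rw [hv x]
        constructor
        · rintro (rfl | hx)
          · exact Or.inr (Or.inr rfl)
          · tauto
        · rintro (hcl | hk | rfl)
          · tauto
          · tauto
          · exact Or.inl rfl
    · have hstep : pvStepA board g w d (v, k.map (fun c => (c, d + 1, w))) n
          = (v, k.map (fun c => (c, d + 1, w))) := by
        unfold pvStepA
        rw [if_neg]
        rintro ⟨h1, h2, h3, h4, h5, -⟩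
        exact hP ⟨h1, h2, h3, h4, h5⟩
      have hq : pvAddQ board claimed g k n = k := by
        unfold pvAddQ
        rw [if_neg]
        rintro ⟨h1, h2, h3, h4, h5, -⟩
        exact hP ⟨h1, h2, h3, h4, h5⟩
      rw [hstep, hq]
      exact ih v k hv

-- the fresh-entry component of A's scan is a passive accumulator
lemma pvStepA_shift (board : List (Int × Int)) (g : Int) (w : String) (d : Int) :
    ∀ (ns : List (Int × Int)) (v : Std.HashMap (Int × Int) String)
      (o : List ((Int × Int) × Int × String)),
      ns.foldl (pvStepA board g w d) (v, o)
        = ((ns.foldl (pvStepA board g w d) (v, [])).1,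
            o ++ (ns.foldl (pvStepA board g w d) (v, [])).2) := by
  intro ns
  induction ns with
  | nil => intro v o; simp
  | cons n ns ih =>
    intro v o
    simp only [List.foldl_cons]
    have hstep : ∀ (o' : List ((Int × Int) × Int × String)),
        pvStepA board g w d (v, o') n
          = ((pvStepA board g w d (v, []) n).1, o' ++ (pvStepA board g w d (v, []) n).2) := by
      intro o'
      unfold pvStepA
      split_ifs <;> simp
    rw [hstep o, hstep []]
    simp only [List.nil_append]
    rw [ih ((pvStepA board g w d (v, []) n).1) (o ++ (pvStepA board g w d (v, []) n).2),
      ih ((pvStepA board g w d (v, []) n).1) ((pvStepA board g w d (v, []) n).2)]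
    simp

lemma pvDirs_map (c : Int × Int) :
    pvDirs.map (fun dd : Int × Int => (c.1 + dd.1, c.2 + dd.2)) = pvAdjB c := by
  simp only [pvDirs, pvAdjB, List.map_cons, List.map_nil]
  norm_num
  exact ⟨by ring, by ring⟩

-- processing one whole layer of A's queue appends the pvAddQ-fold of its candidate stream
lemma pvLayerA (board claimed : List (Int × Int)) (g : Int) (w : String) (d : Int) :
    ∀ (l : List (Int × Int)) (acc : List ((Int × Int) × Int × String))
      (v : Std.HashMap (Int × Int) String) (K : List (Int × Int)) (t : Int),
      (∀ x, v.contains x = true ↔ x ∈ claimed ∨ x ∈ K) →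
      ∃ v' : Std.HashMap (Int × Int) String,
        (∀ x, v'.contains x = true
            ↔ x ∈ claimed ∨ x ∈ (l.flatMap pvAdjB).foldl (pvAddQ board claimed g) K)
        ∧ pvBfsA board g (l.map (fun c => (c, d, w)) ++ acc
              ++ K.map (fun c => (c, d + 1, w))) v t
          = pvBfsA board g (acc
              ++ ((l.flatMap pvAdjB).foldl (pvAddQ board claimed g) K).map
                  (fun c => (c, d + 1, w))) v'
              (t + if w = "ME" then (l.length : Int) else 0) := by
  intro l
  induction l with
  | nil =>
    intro acc v K t hv
    refine ⟨v, by simpa using hv, ?_⟩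
    simp [ite_self]
  | cons c l ih =>
    intro acc v K t hv
    have hfold : pvDirs.foldl
          (fun st dd => pvStepA board g w d st (c.1 + dd.1, c.2 + dd.2)) (v, [])
        = (pvAdjB c).foldl (pvStepA board g w d) (v, []) := by
      rw [← pvDirs_map c, List.foldl_map]
    obtain ⟨hv1, hout⟩ := pvScanA board claimed g w d (pvAdjB c) v K hv
    have hshift := pvStepA_shift board g w d (pvAdjB c) v (K.map (fun c => (c, d + 1, w)))
    have hfst : ((pvAdjB c).foldl (pvStepA board g w d) (v, [])).1
        = ((pvAdjB c).foldl (pvStepA board g w d)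
            (v, K.map (fun c => (c, d + 1, w)))).1 := by
      rw [hshift]
    have hsnd : K.map (fun c => (c, d + 1, w))
          ++ ((pvAdjB c).foldl (pvStepA board g w d) (v, [])).2
        = ((pvAdjB c).foldl (pvStepA board g w d)
            (v, K.map (fun c => (c, d + 1, w)))).2 := by
      rw [hshift]
    rw [hout] at hsnd
    simp only [List.map_cons, List.cons_append]
    rw [show pvBfsA board g ((c, d, w) :: (l.map (fun c => (c, d, w)) ++ acc
            ++ K.map (fun c => (c, d + 1, w)))) v t
        = pvBfsA board g ((l.map (fun c => (c, d, w)) ++ acc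
              ++ K.map (fun c => (c, d + 1, w)))
            ++ (pvDirs.foldl
                (fun st dd => pvStepA board g w d st (c.1 + dd.1, c.2 + dd.2)) (v, [])).2)
            (pvDirs.foldl
                (fun st dd => pvStepA board g w d st (c.1 + dd.1, c.2 + dd.2)) (v, [])).1
            (if w = "ME" then t + 1 else t) from by rw [pvBfsA]]
    rw [hfold]
    have hqueue : (l.map (fun c => (c, d, w)) ++ acc ++ K.map (fun c => (c, d + 1, w)))
          ++ ((pvAdjB c).foldl (pvStepA board g w d) (v, [])).2
        = l.map (fun c => (c, d, w)) ++ acc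
          ++ ((pvAdjB c).foldl (pvAddQ board claimed g) K).map (fun c => (c, d + 1, w)) := by
      rw [← hsnd]
      simp [List.append_assoc]
    rw [hqueue]
    have hv1' : ∀ x, ((pvAdjB c).foldl (pvStepA board g w d) (v, [])).1.contains x = true
        ↔ x ∈ claimed ∨ x ∈ (pvAdjB c).foldl (pvAddQ board claimed g) K := by
      intro x
      rw [hfst]
      exact hv1 x
    obtain ⟨v', hv', heq⟩ := ih acc ((pvAdjB c).foldl (pvStepA board g w d) (v, [])).1
      ((pvAdjB c).foldl (pvAddQ board claimed g) K) (if w = "ME" then t + 1 else t) hv1'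
    refine ⟨v', ?_, ?_⟩
    · intro x
      rw [hv' x, List.flatMap_cons, List.foldl_append]
    · rw [heq, List.flatMap_cons, List.foldl_append]
      have harith : (if w = "ME" then t + 1 else t)
            + (if w = "ME" then (l.length : Int) else 0)
          = t + (if w = "ME" then ((c :: l).length : Int) else 0) := by
        by_cases hw : w = "ME"
        · simp only [hw, List.length_cons]
          push_cast
          ring
        · simp [hw]
      rw [harith]

-- A's whole BFS = B's round loop
lemma pvMainR (board : List (Int × Int)) (g : Int) :
    ∀ (mine theirs claimed : List (Int × Int)) (terr : Int)
      (v : Std.HashMap (Int × Int) String) (d : Int),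
      (∀ x, v.contains x = true ↔ x ∈ claimed) →
      pvBfsA board g (mine.map (fun c => (c, d, "ME"))
          ++ theirs.map (fun c => (c, d, "ENEMY"))) v terr
        = pvRoundsB (PySem.Set.ofList board) g mine theirs claimed terr := by
  intro mine theirs claimed terr
  induction mine, theirs, claimed, terr
      using pvRoundsB.induct (blocked := PySem.Set.ofList board) (g := g) with
  | case1 mine theirs claimed terr h =>
    intro v d hv
    obtain ⟨h1, h2⟩ := h
    subst h1; subst h2
    rw [pvRoundsB, if_pos ⟨rfl, rfl⟩]
    simp only [List.map_nil, List.nil_append]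
    rw [pvBfsA]
  | case2 mine theirs claimed terr h terr' nm cl1 nt ih =>
    intro v d hv
    obtain ⟨v1, hv1, he1⟩ := pvLayerA board claimed g "ME" d mine
      (theirs.map (fun c => (c, d, "ENEMY"))) v [] terr
      (fun x => by rw [hv x]; simp)
    obtain ⟨v2, hv2, he2⟩ := pvLayerA board cl1 g "ENEMY" d theirs
      (nm.map (fun c => (c, d + 1, "ME"))) v1 [] (terr + (mine.length : Int))
      (fun x => by
        rw [hv1 x, ← pvSpread_eq_fold board claimed g mine]
        simp only [List.not_mem_nil, or_false]
        exact (PySem.Set.mem_union claimed _ x).symm)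
    rw [← pvSpread_eq_fold board claimed g mine] at he1
    rw [← pvSpread_eq_fold board cl1 g theirs] at he2
    simp only [List.map_nil, List.append_nil] at he1
    rw [if_neg (by decide : ¬("ENEMY" : String) = "ME")] at he2
    simp only [List.map_nil, List.append_nil, add_zero] at he2
    rw [pvRoundsB, if_neg h]
    exact he1.trans (he2.trans (ih v2 (d + 1)
      (fun x => by
        rw [hv2 x, ← pvSpread_eq_fold board cl1 g theirs]
        exact (PySem.Set.mem_union cl1 _ x).symm)))

lemma pvCalc_eq (me : Int × Int) (enemies : List (Int × Int)) (board : List (Int × Int))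
    (g : Int) : pvCalcA me enemies board g = pvCalcB me enemies board g := by
  have hsingle : PySem.Set.ofList [me] = [me] :=
    PySem.Set.ofList_eq_self_of_nodup [me] (by simp)
  -- abbreviations for B's round-0 state
  set theirsB := PySem.Set.diff (PySem.Set.ofList enemies) (PySem.Set.ofList [me]) with htheirsB
  set claimedB := PySem.Set.union (PySem.Set.ofList [me]) theirsB with hclaimedB
  have hmemB : ∀ x, x ∈ claimedB ↔ x = me ∨ x ∈ enemies := by
    intro x
    rw [hclaimedB, PySem.Set.mem_union, htheirsB, PySem.Set.mem_diff]
    simp only [PySem.Set.mem_ofList, List.mem_singleton]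
    tauto
  -- A's initial visited dict agrees with claimedB as a membership test
  have hins : ∀ (es : List (Int × Int)) (v : Std.HashMap (Int × Int) String) (x : Int × Int),
      ((es.foldl (fun v e => v.insert e "ENEMY") v).contains x = true)
        ↔ (x ∈ es ∨ v.contains x = true) := by
    intro es
    induction es with
    | nil => intro v x; simp
    | cons e es ih =>
      intro v x
      simp only [List.foldl_cons]
      rw [ih, Std.HashMap.contains_insert]
      simp only [Bool.or_eq_true, beq_iff_eq, List.mem_cons]
      tauto
  have hv0 : ∀ x, ((enemies.foldl (fun v e => v.insert e "ENEMY")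
        ((∅ : Std.HashMap (Int × Int) String).insert me "ME")).contains x = true)
      ↔ x ∈ claimedB := by
    intro x
    rw [hins, Std.HashMap.contains_insert, hmemB]
    simp only [Bool.or_eq_true, beq_iff_eq, Std.HashMap.contains_empty, Bool.false_eq_true,
      or_false]
    tauto
  -- round 0, ME layer
  obtain ⟨v1, hv1, he1⟩ := pvLayerA board claimedB g "ME" 0 [me]
    (enemies.map (fun e => (e, (0 : Int), "ENEMY")))
    (enemies.foldl (fun v e => v.insert e "ENEMY")
      ((∅ : Std.HashMap (Int × Int) String).insert me "ME")) [] 0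
    (fun x => by rw [hv0 x]; simp)
  set nmB := pvSpreadB (PySem.Set.ofList [me]) (PySem.Set.ofList board) claimedB g with hnmB
  have hKME : ([me].flatMap pvAdjB).foldl (pvAddQ board claimedB g) [] = nmB := by
    rw [hnmB, hsingle, pvSpread_eq_fold]
  set cl1 := PySem.Set.union claimedB nmB with hcl1
  -- round 0, ENEMY layer (over the raw enemies list, duplicates and all)
  obtain ⟨v2, hv2, he2⟩ := pvLayerA board cl1 g "ENEMY" 0 enemies
    (nmB.map (fun c => (c, (0 : Int) + 1, "ME"))) v1 [] (0 + if ("ME" : String) = "ME" then (([me].length : Int)) else 0)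
    (fun x => by
      rw [hv1 x, hKME]
      simp only [List.not_mem_nil, or_false]
      exact (PySem.Set.mem_union claimedB nmB x).symm)
  -- the raw enemies list feeds the same cells as B's deduplicated, me-free frontier
  have hEN : (enemies.flatMap pvAdjB).foldl (pvAddQ board cl1 g) []
      = (theirsB.flatMap pvAdjB).foldl (pvAddQ board cl1 g) [] := by
    have hseen : ∀ c ∈ [me], ∀ n ∈ pvAdjB c,
        (0 ≤ n.1 ∧ n.1 < g ∧ 0 ≤ n.2 ∧ n.2 < g ∧ n ∉ board ∧ n ∉ cl1) → n ∈ ([] : List (Int × Int)) := by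
      intro c hc n hn hq
      rw [List.mem_singleton] at hc
      subst hc
      exfalso
      apply hq.2.2.2.2.2
      rw [hcl1, PySem.Set.mem_union]
      by_cases hcl : n ∈ claimedB
      · exact Or.inl hcl
      · refine Or.inr ?_
        rw [← hKME]
        refine pvAddQ_mem board claimedB g _ _ n ?_
          ⟨hq.1, hq.2.1, hq.2.2.1, hq.2.2.2.1, hq.2.2.2.2.1, hcl⟩
        simp [hn]
    have hdd : pvDedupFrom [me] enemies = theirsB := by
      rw [pvDedupFrom_eq, htheirsB, hsingle]
      rw [show PySem.Set.diff (PySem.Set.ofList enemies) [me]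
          = (PySem.Set.ofList enemies).filter (fun a => !(([me] : List (Int × Int)).contains a))
          from rfl]
      simp only [PySem.List.dedup_eq_ofList]
      apply List.filter_congr
      intro a _
      by_cases ha : a = me
      · subst ha; simp
      · simp [ha]
    rw [pvFoldDedup board cl1 g enemies [me] [] hseen, hdd]
  set ntB := pvSpreadB theirsB (PySem.Set.ofList board) cl1 g with hntB
  have hKEN : (enemies.flatMap pvAdjB).foldl (pvAddQ board cl1 g) [] = ntB := by
    rw [hEN, hntB, pvSpread_eq_fold]
  -- remaining rounds
  have hmain := pvMainR board g nmB ntB (PySem.Set.union cl1 ntB)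
    (0 + if ("ME" : String) = "ME" then (([me].length : Int)) else 0 + 0) v2 (0 + 1)
    (fun x => by
      rw [hv2 x, hKEN]
      exact (PySem.Set.mem_union cl1 ntB x).symm)
  -- assemble
  unfold pvCalcA pvCalcB
  rw [show ([(me, (0 : Int), "ME")] ++ enemies.map (fun e => (e, (0 : Int), "ENEMY")))
      = ([me].map (fun c => (c, (0 : Int), "ME")) ++ enemies.map (fun e => (e, (0 : Int), "ENEMY"))
          ++ ([] : List (Int × Int)).map (fun c => (c, (0 : Int) + 1, "ME"))) from by simp]
  rw [he1]
  rw [hKME] at he1 ⊢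
  rw [show (enemies.map (fun e => (e, (0 : Int), "ENEMY")))
      ++ nmB.map (fun c => (c, (0 : Int) + 1, "ME"))
      = (enemies.map (fun c => (c, (0 : Int), "ENEMY")))
        ++ nmB.map (fun c => (c, (0 : Int) + 1, "ME"))
        ++ ([] : List (Int × Int)).map (fun c => (c, (0 : Int) + 1, "ENEMY")) from by simp]
  rw [he2, hKEN]
  rw [show pvRoundsB (PySem.Set.ofList board) g (PySem.Set.ofList [me]) theirsB claimedB 0
      = pvRoundsB (PySem.Set.ofList board) g nmB ntB (PySem.Set.union cl1 ntB)
          (0 + ((PySem.Set.ofList [me]).length : Int)) from by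
    rw [pvRoundsB, if_neg (by rw [hsingle]; simp)]]
  rw [hsingle]
  simpa using hmain

-- A's enemy-option list is a permutation of B's _adjacent list
lemma pvOptsPerm (c : Int × Int) :
    ([(c.1, c.2 - 1), (c.1, c.2 + 1), (c.1 - 1, c.2), (c.1 + 1, c.2)]).Perm (pvAdjB c) := by
  rw [pvAdjB]
  refine List.Perm.trans (List.Perm.swap _ _ _) ?_
  exact List.Perm.cons _ (List.Perm.cons _ (List.Perm.swap _ _ _))

-- a first-minimum fold from the `inf` sentinel is List.min?
lemma pvMinFoldA (x : Int) (t : List Int) :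
    ((x :: t).foldl (fun (w : Option Int) v =>
        match w with
        | none => some v
        | some wv => if v < wv then some v else some wv) none)
      = (x :: t).min? := by
  have aux : ∀ (t : List Int) (x : Int),
      t.foldl (fun (w : Option Int) v =>
        match w with
        | none => some v
        | some wv => if v < wv then some v else some wv) (some x)
      = some (t.foldl min x) := by
    intro t
    induction t with
    | nil => intro x; rfl
    | cons y t ih =>
      intro x
      simp only [List.foldl_cons]
      rw [show (if y < x then some y else some x) = some (min x y) from by
        rcases lt_or_ge y x with h | h
        · rw [if_pos h, min_eq_right (le_of_lt h)]
        · rw [if_neg (not_lt.2 h), min_eq_left h]]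
      exact ih (min x y)
  simp only [List.foldl_cons]
  rw [aux]
  rfl

lemma pvMinPerm (l1 l2 : List Int) (h : l1.Perm l2) : l1.min? = l2.min? := by
  cases l1 with
  | nil =>
    rw [List.Perm.eq_nil h.symm]
  | cons x t =>
    have hm : (x :: t).min? = some (t.foldl min x) := rfl
    have hc := List.min?_eq_some_iff.1 hm
    rw [hm]
    symm
    rw [List.min?_eq_some_iff]
    exact ⟨h.mem_iff.1 hc.1, fun b hb => hc.2 b (h.mem_iff.2 hb)⟩

-- ===== VERDICT (by name: the statement is the Claim_ definition above) =====
theorem evaluate_move_with_prediction_spec : Claim_equal_evaluate_move_with_prediction := by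
  unfold Claim_equal_evaluate_move_with_prediction
  intro me enemies board g _hdom
  unfold Spec_evaluate_move_with_prediction
  unfold evaluate_move_with_prediction evaluate_move_with_prediction_alt
  simp only [pvCalc_eq]
  have hfp := (pvOptsPerm (PySem.List.minD enemies
      (fun e => |e.1 - me.1| + |e.2 - me.2|) (0, 0))).filter
    (fun ep => decide (0 ≤ ep.1 ∧ ep.1 < g ∧ 0 ≤ ep.2 ∧ ep.2 < g ∧ ep ∉ board ∧ ep ≠ me))
  split_ifs with h1 h2 h3 h4
  · rfl
  · rfl
  · -- A sees no valid enemy move where B still does: impossible, the lists are permutations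
    exact absurd (List.Perm.eq_nil ((h2 ▸ hfp).symm)) h3
  · exact absurd (List.Perm.eq_nil (h4 ▸ hfp)) h2
  · -- minimax branch: first-minimum fold = min() of a permuted value list
    set closest := PySem.List.minD enemies
      (fun e => |e.1 - me.1| + |e.2 - me.2|) (0, 0) with hclosest
    set p := (fun ep : Int × Int =>
      decide (0 ≤ ep.1 ∧ ep.1 < g ∧ 0 ≤ ep.2 ∧ ep.2 < g
        ∧ ep ∉ board ∧ ep ≠ me)) with hp
    set F := fun m => pvCalcB me (enemies.map (fun e => if e = closest then m else e)) board g
      with hF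
    have hperm : (([(closest.1, closest.2 - 1), (closest.1, closest.2 + 1),
          (closest.1 - 1, closest.2), (closest.1 + 1, closest.2)].filter p).map F).Perm
        (((pvAdjB closest).filter p).map F) := hfp.map F
    rw [show (([(closest.1, closest.2 - 1), (closest.1, closest.2 + 1),
          (closest.1 - 1, closest.2), (closest.1 + 1, closest.2)].filter p).foldl
        (fun (w : Option Int) m =>
          match w with
          | none => some (F m)
          | some wv => if F m < wv then some (F m) else some wv) none)
      = ((([(closest.1, closest.2 - 1), (closest.1, closest.2 + 1),
          (closest.1 - 1, closest.2), (closest.1 + 1, closest.2)].filter p).map F).foldl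
        (fun (w : Option Int) v =>
          match w with
          | none => some v
          | some wv => if v < wv then some v else some wv) none) from
      (List.foldl_map (f := F) (g := fun (w : Option Int) v =>
        match w with
        | none => some v
        | some wv => if v < wv then some v else some wv)
        (l := [(closest.1, closest.2 - 1), (closest.1, closest.2 + 1),
          (closest.1 - 1, closest.2), (closest.1 + 1, closest.2)].filter p)
        (init := none)).symm]
    cases hvm : ([(closest.1, closest.2 - 1), (closest.1, closest.2 + 1),
        (closest.1 - 1, closest.2), (closest.1 + 1, closest.2)].filter p).map F with
    | nil =>
      rw [List.map_eq_nil_iff] at hvm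
      exact absurd hvm h2
    | cons x t =>
      cases hwm : ((pvAdjB closest).filter p).map F with
      | nil =>
        rw [List.map_eq_nil_iff] at hwm
        exact absurd hwm h4
      | cons y u =>
        rw [hvm, hwm] at hperm
        rw [pvMinFoldA, PySem.List.min?_id_cons]
        rw [show (some (u.foldl min y)) = (y :: u).min? from rfl]
        rw [pvMinPerm _ _ hperm]
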